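-- pv_equiv track=rewrite | github.com/maria-pugacheva/LeetCode | src/python/_01_easy/_2383_minimum-hours-of-training-to-win-a-competition.py | solution
-- ===== SOURCE A (Python) =====
-- from typing import List
--
-- def solution(initEnergy: int, initExp: int, energy: List[int], exp: List[int]) -> int:
--     """You will face n opponents in order. The energy and experience of
--     the i-th opponent is denoted by energy[i] and exp[i] respectively.
--     When you face an opponent, you need to have both strictly greater
--     experience and energy to defeat them. Before starting the
--     competition, you can train for some number of hours. Return the
--     minimum number of training hours required to defeat all n opponents.
--
--     Examples:
--         >>> solution(1, 1, [1, 1, 1, 1], [1, 1, 1, 50])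
--         51
--         >>> solution(5, 3, [1, 4, 3, 2], [2, 6, 3, 1])
--         8
--         >>> solution(2, 4, [1], [3])
--         0
--     """
--     hours = 0
--     for i in range(len(energy)):
--         if initEnergy <= energy[i]:
--             a = energy[i] - initEnergy + 1
--             hours += a
--             initEnergy += a
--         if initExp <= exp[i]:
--             b = exp[i] - initExp + 1
--             hours += b
--             initExp += b
--         initEnergy -= energy[i]
--         initExp += exp[i]
--     return hours
-- ===== SOURCE B (Python) =====
-- from typing import List
--
-- def solution(initEnergy: int, initExp: int, energy: List[int], exp: List[int]) -> int:
--     # Energy cost in closed form: max(0, (max nonempty prefix sum) + 1 - initEnergy).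
--     run = 0
--     m = None
--     for e in energy:
--         run += e
--         if m is None or run > m:
--             m = run
--     hours = 0 if m is None else max(0, m + 1 - initEnergy)
--     # Experience cost: sequential top-ups over the opponents actually faced.
--     cur = initExp
--     for x in exp[:len(energy)]:
--         if cur <= x:
--             hours += x - cur + 1
--             cur = x + 1
--         cur += x
--     return hours
-- ===== Notes on version B (the rewrite author's own statement) =====
-- stated objective: alternative
-- what changed: Instead of one interleaved loop threading (hours, energy, exp) state, B splits the two concerns: the energy cost is computed in closed form as max(0, maxPrefixSum(energy)+1-initEnergy) from a single prefix-sum pass, and the experience cost by a separate sequential top-up loop.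
import Mathlib
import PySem

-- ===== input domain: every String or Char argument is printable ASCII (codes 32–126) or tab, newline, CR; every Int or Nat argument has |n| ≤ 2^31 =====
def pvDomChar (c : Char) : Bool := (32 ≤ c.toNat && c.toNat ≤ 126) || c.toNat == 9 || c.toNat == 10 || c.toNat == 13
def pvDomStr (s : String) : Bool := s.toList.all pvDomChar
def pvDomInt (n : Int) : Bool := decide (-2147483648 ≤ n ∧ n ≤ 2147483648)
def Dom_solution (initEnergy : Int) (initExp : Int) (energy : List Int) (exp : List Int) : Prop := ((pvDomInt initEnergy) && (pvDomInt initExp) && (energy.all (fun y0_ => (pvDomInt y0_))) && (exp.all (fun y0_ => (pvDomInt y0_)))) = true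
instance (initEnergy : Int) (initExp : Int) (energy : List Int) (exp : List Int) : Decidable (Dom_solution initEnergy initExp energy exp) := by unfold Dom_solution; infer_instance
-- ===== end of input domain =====

-- B re-implements A by splitting the interleaved loop into a closed-form energy cost
-- (max prefix sum) plus a separate experience top-up loop; same cost, different decomposition.
-- A mutates nothing; equivalence is about the return value.

-- ===== PORT A =====
-- for i in range(len(energy)): train energy, train exp, fight (subtract/add).
-- exp[i] is ported with pyGetD (default never used inside Pre_, where i < exp.length).
def solution (initEnergy : Int) (initExp : Int) (energy : List Int) (exp : List Int) : Int :=
  let st := (PySem.List.pyRange 0 (energy.length : Int) 1).foldl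
    (fun (s : Int × Int × Int) i =>
      let ei := PySem.List.pyGetD energy i 0
      let xi := PySem.List.pyGetD exp i 0
      -- if initEnergy <= energy[i]: a = energy[i] - initEnergy + 1; hours += a; initEnergy += a
      let s1 := if s.2.1 ≤ ei then (s.1 + (ei - s.2.1 + 1), s.2.1 + (ei - s.2.1 + 1), s.2.2) else s
      -- if initExp <= exp[i]: b = exp[i] - initExp + 1; hours += b; initExp += b
      let s2 := if s1.2.2 ≤ xi then (s1.1 + (xi - s1.2.2 + 1), s1.2.1, s1.2.2 + (xi - s1.2.2 + 1)) else s1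
      -- initEnergy -= energy[i]; initExp += exp[i]
      (s2.1, s2.2.1 - ei, s2.2.2 + xi))
    (0, initEnergy, initExp)
  st.1

-- ===== PORT B =====
-- exp[:len(energy)] is List.take energy.length exp (exact: the bound is nonnegative).
def solution_alt (initEnergy : Int) (initExp : Int) (energy : List Int) (exp : List Int) : Int :=
  -- running prefix sum and its maximum (None while no prefix seen)
  let rm := energy.foldl
    (fun (s : Int × Option Int) e =>
      let run := s.1 + e
      let m := match s.2 with
        | none => some run
        | some mm => if mm < run then some run else some mm
      (run, m))
    (0, none)
  let hours := match rm.2 with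
    | none => 0
    | some m => max 0 (m + 1 - initEnergy)
  -- experience top-ups
  let st := (List.take energy.length exp).foldl
    (fun (s : Int × Int) x =>
      let s1 := if s.2 ≤ x then (s.1 + (x - s.2 + 1), x + 1) else s
      (s1.1, s1.2 + x))
    (hours, initExp)
  st.1

-- ===== PRECONDITION & SPEC =====
-- Pre_ excludes exactly the inputs where A raises IndexError: the loop reads exp[i]
-- for every i < len(energy), so it needs len(energy) ≤ len(exp).
def Pre_solution (initEnergy : Int) (initExp : Int) (energy : List Int) (exp : List Int) : Prop :=
  energy.length ≤ exp.length
instance (initEnergy : Int) (initExp : Int) (energy : List Int) (exp : List Int) : Decidable (Pre_solution initEnergy initExp energy exp) := by unfold Pre_solution; infer_instance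

def pvWitness_solution : Int × Int × List Int × List Int := (5, 3, [1, 4, 3, 2], [2, 6, 3, 1])

def Spec_solution (initEnergy : Int) (initExp : Int) (energy : List Int) (exp : List Int) (out : Int) : Prop := out = solution_alt initEnergy initExp energy exp
instance (initEnergy : Int) (initExp : Int) (energy : List Int) (exp : List Int) (out : Int) : Decidable (Spec_solution initEnergy initExp energy exp out) := by unfold Spec_solution; infer_instance

-- ===== CLAIM (what is proved, stated in full; the proofs are below) =====
def Claim_equal_solution : Prop := ∀ (initEnergy : Int) (initExp : Int) (energy : List Int) (exp : List Int), Dom_solution initEnergy initExp energy exp → Pre_solution initEnergy initExp energy exp → Spec_solution initEnergy initExp energy exp (solution initEnergy initExp energy exp)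

-- ===== LEMMAS AND PROOFS =====

-- A's combined loop step, on the element pair (e, x)
def gA (s : Int × Int × Int) (e x : Int) : Int × Int × Int :=
  let s1 := if s.2.1 ≤ e then (s.1 + (e - s.2.1 + 1), s.2.1 + (e - s.2.1 + 1), s.2.2) else s
  let s2 := if s1.2.2 ≤ x then (s1.1 + (x - s1.2.2 + 1), s1.2.1, s1.2.2 + (x - s1.2.2 + 1)) else s1
  (s2.1, s2.2.1 - e, s2.2.2 + x)

-- the experience-only part of A's step (= B's experience loop step)
def stepX (s : Int × Int) (x : Int) : Int × Int :=
  if s.2 ≤ x then (s.1 + (x - s.2 + 1), s.2 + (x - s.2 + 1) + x) else (s.1, s.2 + x)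

-- B's prefix-max step
def stepB (s : Int × Option Int) (e : Int) : Int × Option Int :=
  let run := s.1 + e
  let m := match s.2 with
    | none => some run
    | some mm => if mm < run then some run else some mm
  (run, m)

-- hours added by the energy branch / the experience branch, as recursions
def eAdd : List Int → Int → Int
  | [], _ => 0
  | e :: t, E => (if E ≤ e then e - E + 1 else 0) + eAdd t ((if E ≤ e then E + (e - E + 1) else E) - e)

def xAdd : List Int → Int → Int
  | [], _ => 0
  | x :: t, X => (if X ≤ x then x - X + 1 else 0) + xAdd t ((if X ≤ x then X + (x - X + 1) else X) + x)

-- maximum over the nonempty prefix sums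
def mp : List Int → Option Int
  | [] => none
  | e :: t => some (match mp t with | none => e | some m => e + max 0 m)

def eCost (en : List Int) (E : Int) : Int :=
  match mp en with | none => 0 | some m => max 0 (m + 1 - E)

lemma fold_idx_nat {σ : Type} (g : σ → Int → Int → σ) :
    ∀ (en ex : List Int) (s : σ), en.length ≤ ex.length →
    (List.range en.length).foldl (fun s k => g s (en.getD k 0) (ex.getD k 0)) s
      = (en.zip ex).foldl (fun s p => g s p.1 p.2) s := by
  intro en
  induction en with
  | nil => intro ex s _; simp
  | cons e t ih =>
    intro ex s h
    cases ex with
    | nil => simp at h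
    | cons x xt =>
      simp only [List.length_cons, List.range_succ_eq_map, List.foldl_cons, List.foldl_map,
        List.zip_cons_cons, List.getD_cons_zero, List.getD_cons_succ]
      exact ih xt (g s e x) (by simpa using h)

lemma fold_idx {σ : Type} (g : σ → Int → Int → σ) (en ex : List Int) (s : σ)
    (h : en.length ≤ ex.length) :
    (PySem.List.pyRange 0 (en.length : Int) 1).foldl
        (fun s i => g s (PySem.List.pyGetD en i 0) (PySem.List.pyGetD ex i 0)) s
      = (en.zip ex).foldl (fun s p => g s p.1 p.2) s := by
  rw [PySem.List.pyRange_one, List.foldl_map]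
  have h0 : ((en.length : Int) - 0).toNat = en.length := by omega
  rw [h0, ← fold_idx_nat g en ex s h]
  have hf : (fun (s : σ) (k : Nat) => g s (PySem.List.pyGetD en ((0 : Int) + ↑k) 0) (PySem.List.pyGetD ex ((0 : Int) + ↑k) 0))
      = (fun s k => g s (en.getD k 0) (ex.getD k 0)) := by
    funext s' k
    simp [PySem.List.pyGetD_natCast]
  rw [hf]

lemma decomp : ∀ (l : List (Int × Int)) (h E X : Int),
    (l.foldl (fun s p => gA s p.1 p.2) (h, E, X)).1
      = h + eAdd (l.map Prod.fst) E + xAdd (l.map Prod.snd) X := by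
  intro l
  induction l with
  | nil => intro h E X; simp [eAdd, xAdd]
  | cons p t ih =>
    intro h E X
    obtain ⟨e, x⟩ := p
    by_cases h1 : E ≤ e <;> by_cases h2 : X ≤ x
    · rw [show (List.foldl (fun s p => gA s p.1 p.2) (h, E, X) ((e, x) :: t))
            = List.foldl (fun s p => gA s p.1 p.2)
                (h + (e - E + 1) + (x - X + 1), E + (e - E + 1) - e, X + (x - X + 1) + x) t from by
          simp [List.foldl_cons, gA, h1, h2]]
      rw [ih]
      simp only [List.map_cons, eAdd, xAdd, if_pos h1, if_pos h2]
      ring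
    · rw [show (List.foldl (fun s p => gA s p.1 p.2) (h, E, X) ((e, x) :: t))
            = List.foldl (fun s p => gA s p.1 p.2)
                (h + (e - E + 1), E + (e - E + 1) - e, X + x) t from by
          simp [List.foldl_cons, gA, h1, h2]]
      rw [ih]
      simp only [List.map_cons, eAdd, xAdd, if_pos h1, if_neg h2]
      ring
    · rw [show (List.foldl (fun s p => gA s p.1 p.2) (h, E, X) ((e, x) :: t))
            = List.foldl (fun s p => gA s p.1 p.2)
                (h + (x - X + 1), E - e, X + (x - X + 1) + x) t from by
          simp [List.foldl_cons, gA, h1, h2]]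
      rw [ih]
      simp only [List.map_cons, eAdd, xAdd, if_neg h1, if_pos h2]
      ring
    · rw [show (List.foldl (fun s p => gA s p.1 p.2) (h, E, X) ((e, x) :: t))
            = List.foldl (fun s p => gA s p.1 p.2) (h, E - e, X + x) t from by
          simp [List.foldl_cons, gA, h1, h2]]
      rw [ih]
      simp only [List.map_cons, eAdd, xAdd, if_neg h1, if_neg h2]
      ring

lemma xAdd_fold : ∀ (xs : List Int) (h X : Int),
    (xs.foldl stepX (h, X)).1 = h + xAdd xs X := by
  intro xs
  induction xs with
  | nil => intro h X; simp [xAdd]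
  | cons x t ih =>
    intro h X
    simp only [List.foldl_cons, stepX, xAdd]
    split_ifs with hc
    · rw [ih]; ring
    · rw [ih]; ring

lemma energyA : ∀ (en : List Int) (E : Int), eAdd en E = eCost en E := by
  intro en
  induction en with
  | nil => intro E; simp [eAdd, eCost, mp]
  | cons e t ih =>
    intro E
    simp only [eAdd, eCost, mp]
    split_ifs with hc
    · rw [ih]
      simp only [eCost]
      cases hmp : mp t with
      | none => simp [hmp]; omega
      | some m => simp [hmp]; omega
    · rw [ih]
      simp only [eCost]
      cases hmp : mp t with
      | none => simp [hmp]; omega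
      | some m => simp [hmp]; omega

lemma bf_some : ∀ (en : List Int) (r m0 : Int),
    (en.foldl stepB (r, some m0)).2
      = some (match mp en with | none => m0 | some m => max m0 (r + m)) := by
  intro en
  induction en with
  | nil => intro r m0; simp [mp]
  | cons e t ih =>
    intro r m0
    simp only [List.foldl_cons, stepB, mp]
    split_ifs with hc
    · rw [ih]
      cases hmp : mp t with
      | none => simp only [Option.some.injEq, max_def]; split_ifs <;> (try ring_nf) <;> omega
      | some m => simp only [Option.some.injEq, max_def]; split_ifs <;> (try ring_nf) <;> omega
    · rw [ih]
      cases hmp : mp t with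
      | none => simp only [Option.some.injEq, max_def]; split_ifs <;> (try ring_nf) <;> omega
      | some m => simp only [Option.some.injEq, max_def]; split_ifs <;> (try ring_nf) <;> omega

lemma bf_none : ∀ (en : List Int), (en.foldl stepB (0, none)).2 = mp en := by
  intro en
  cases en with
  | nil => simp [mp]
  | cons e t =>
    simp only [List.foldl_cons, stepB, mp]
    rw [bf_some]
    cases hmp : mp t with
    | none => simp
    | some m => simp only [Option.some.injEq, max_def]; split_ifs <;> (try ring_nf) <;> omega

lemma snd_zip_take : ∀ (en ex : List Int), en.length ≤ ex.length →
    (en.zip ex).map Prod.snd = ex.take en.length := by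
  intro en
  induction en with
  | nil => intro ex _; simp
  | cons e t ih =>
    intro ex h
    cases ex with
    | nil => simp at h
    | cons x xt =>
      simp only [List.zip_cons_cons, List.map_cons, List.length_cons, List.take_succ_cons]
      rw [ih xt (by simpa using h)]

-- ===== VERDICT (by name: the statement is the Claim_ definition above) =====
theorem solution_spec : Claim_equal_solution := by
  intro initEnergy initExp energy exp _ hpre
  unfold Spec_solution solution solution_alt
  have hg : (fun (s : Int × Int × Int) i =>
      let ei := PySem.List.pyGetD energy i 0
      let xi := PySem.List.pyGetD exp i 0
      let s1 := if s.2.1 ≤ ei then (s.1 + (ei - s.2.1 + 1), s.2.1 + (ei - s.2.1 + 1), s.2.2) else s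
      let s2 := if s1.2.2 ≤ xi then (s1.1 + (xi - s1.2.2 + 1), s1.2.1, s1.2.2 + (xi - s1.2.2 + 1)) else s1
      (s2.1, s2.2.1 - ei, s2.2.2 + xi))
      = (fun s i => gA s (PySem.List.pyGetD energy i 0) (PySem.List.pyGetD exp i 0)) := rfl
  have hB : (fun (s : Int × Option Int) e =>
      let run := s.1 + e
      let m := match s.2 with
        | none => some run
        | some mm => if mm < run then some run else some mm
      (run, m)) = stepB := rfl
  have hX : (fun (s : Int × Int) x =>
      let s1 := if s.2 ≤ x then (s.1 + (x - s.2 + 1), x + 1) else s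
      (s1.1, s1.2 + x)) = stepX := by
    funext s x
    simp only [stepX]
    split_ifs with hc
    · simp only [Prod.mk.injEq, true_and]
      ring
    · rfl
  have hlen : energy.length ≤ exp.length := hpre
  rw [hg, hB, hX, fold_idx _ _ _ _ hlen, decomp]
  rw [List.map_fst_zip hlen, snd_zip_take _ _ hlen]
  show 0 + eAdd energy initEnergy + xAdd (List.take energy.length exp) initExp
      = (List.foldl stepX
          ((match (List.foldl stepB ((0 : Int), (none : Option Int)) energy).2 with
            | none => (0 : Int)
            | some m => max 0 (m + 1 - initEnergy)), initExp)
          (List.take energy.length exp)).1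
  rw [xAdd_fold, bf_none, energyA]
  unfold eCost
  cases hmp : mp energy with
  | none => ring
  | some m => ring
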